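-- pv_equiv track=rewrite | github.com/yuanx749/2048-ai-tk | PlayerAI.py | ordering
-- ===== SOURCE A (Python) =====
-- def ordering(matrix):
--     score = 0
--     for i in range(len(matrix)):
--         if (all(matrix[i][j] >= matrix[i][j + 1]
--                 for j in range(len(matrix[i]) - 1)) or
--             all(matrix[i][j] <= matrix[i][j + 1]
--                 for j in range(len(matrix[i]) - 1))):
--             score += max(matrix[i])
--         else:
--             score -= max(matrix[i])
--     for j in range(len(matrix[0])):
--         if (all(matrix[i][j] >= matrix[i + 1][j]
--                 for i in range(len(matrix) - 1)) or
--             all(matrix[i][j] <= matrix[i + 1][j]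
--                 for i in range(len(matrix) - 1))):
--             score += max(matrix[i][j] for i in range(len(matrix)))
--         else:
--             score -= max(matrix[i][j] for i in range(len(matrix)))
--     return score
-- ===== SOURCE B (Python) =====
-- def ordering(matrix):
--     # Single streaming pass over the rows: row monotonicity via comparison with
--     # the sorted row, and per-column monotonicity flags / running maxima
--     # maintained incrementally instead of a second axis-specific index loop.
--     ncols = len(matrix[0])
--     inc = [True] * ncols
--     dec = [True] * ncols
--     cmax = list(matrix[0][:ncols])
--     score = 0
--     prev = None
--     for row in matrix:
--         srt = sorted(row)
--         score += max(row) if row == srt or row == srt[::-1] else -max(row)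
--         if prev is not None:
--             for j in range(ncols):
--                 if prev[j] > row[j]:
--                     inc[j] = False
--                 if prev[j] < row[j]:
--                     dec[j] = False
--                 if row[j] > cmax[j]:
--                     cmax[j] = row[j]
--         prev = row
--     for j in range(ncols):
--         score += cmax[j] if inc[j] or dec[j] else -cmax[j]
--     return score
-- ===== Notes on version B (the rewrite author's own statement) =====
-- stated objective: alternative
-- what changed: Replaced A's two axis-specific index loops by one streaming pass over the rows: each row's monotonicity is decided by comparing it with its sorted copy, and per-column monotonicity flags and running maxima are maintained incrementally in arrays, so the matrix is never re-indexed by columns.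
import Mathlib
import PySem

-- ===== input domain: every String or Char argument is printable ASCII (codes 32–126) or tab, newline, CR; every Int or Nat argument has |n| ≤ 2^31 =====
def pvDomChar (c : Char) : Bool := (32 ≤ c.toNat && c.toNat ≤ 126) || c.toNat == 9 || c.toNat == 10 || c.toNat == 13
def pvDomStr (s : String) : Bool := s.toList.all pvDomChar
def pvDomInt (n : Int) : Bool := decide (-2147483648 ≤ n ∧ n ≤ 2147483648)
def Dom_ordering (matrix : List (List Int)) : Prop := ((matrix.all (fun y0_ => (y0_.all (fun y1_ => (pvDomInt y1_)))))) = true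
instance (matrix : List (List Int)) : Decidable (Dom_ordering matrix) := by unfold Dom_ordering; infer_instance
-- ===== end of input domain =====

-- B replaces A's two axis-specific index loops by one streaming pass over the rows:
-- row monotonicity is decided by comparing the row with its sorted copy, and the
-- per-column monotonicity flags and running maxima are maintained incrementally,
-- so no second pass re-indexes the matrix by columns; objective: alternative, same cost.


-- Python max(xs) of a nonempty list (default only hit outside Pre_)
def pyMaxD (xs : List Int) : Int := (PySem.List.max? xs (fun x => x)).getD 0

-- ===== PORT A =====
-- the two index-generator `all` tests of A's row branch
def rowMonoA (r : List Int) : Bool :=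
  ((List.range (r.length - 1)).all (fun j => decide (r.getD j 0 ≥ r.getD (j + 1) 0))) ||
  ((List.range (r.length - 1)).all (fun j => decide (r.getD j 0 ≤ r.getD (j + 1) 0)))

def ordering (matrix : List (List Int)) : Int :=
  -- second loop (over column indices j of matrix[0]) continues the running score
  -- that the first loop (over row indices i) produced
  (List.range (matrix.getD 0 []).length).foldl
    (fun score j =>
      if ((List.range (matrix.length - 1)).all
            (fun i => decide ((matrix.getD i []).getD j 0 ≥ (matrix.getD (i + 1) []).getD j 0))) ||
         ((List.range (matrix.length - 1)).all
            (fun i => decide ((matrix.getD i []).getD j 0 ≤ (matrix.getD (i + 1) []).getD j 0)))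
      then score + pyMaxD ((List.range matrix.length).map (fun i => (matrix.getD i []).getD j 0))
      else score - pyMaxD ((List.range matrix.length).map (fun i => (matrix.getD i []).getD j 0)))
    ((List.range matrix.length).foldl
      (fun score i =>
        if rowMonoA (matrix.getD i [])
        then score + pyMaxD (matrix.getD i [])
        else score - pyMaxD (matrix.getD i [])) 0)

-- ===== PORT B =====
-- row == sorted(row) or row == sorted(row)[::-1]
-- ([::-1] is List.reverse, cf. PySem.List.slice?_none_none_neg_one)
def rowMonoB (r : List Int) : Bool :=
  decide (r = PySem.List.sorted r (fun x => x) false) ||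
  decide (r = (PySem.List.sorted r (fun x => x) false).reverse)

-- the inner `for j in range(ncols)` body updating (inc, dec, cmax) in place
def colStep (ncols : Nat) (prev row : List Int)
    (st : List Bool × List Bool × List Int) : List Bool × List Bool × List Int :=
  (List.range ncols).foldl
    (fun st j =>
      ((if prev.getD j 0 > row.getD j 0 then st.1.set j false else st.1),
       (if prev.getD j 0 < row.getD j 0 then st.2.1.set j false else st.2.1),
       (if row.getD j 0 > st.2.2.getD j 0 then st.2.2.set j (row.getD j 0) else st.2.2)))
    st

def ordering_alt (matrix : List (List Int)) : Int :=
  let ncols := (matrix.getD 0 []).length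
  -- single pass over the rows: state = (score, prev, (inc, dec, cmax))
  let fin := matrix.foldl
    (fun st row =>
      (st.1 + (if rowMonoB row then pyMaxD row else -pyMaxD row),
       match st.2.1 with
       | none => (some row, st.2.2)
       | some prev => (some row, colStep ncols prev row st.2.2)))
    (0, none, (List.replicate ncols true, List.replicate ncols true, (matrix.getD 0 []).take ncols))
  -- final pass over the column state
  (List.range ncols).foldl
    (fun s j =>
      s + (if fin.2.2.1.getD j false || fin.2.2.2.1.getD j false
           then fin.2.2.2.2.getD j 0 else -(fin.2.2.2.2.getD j 0)))
    fin.1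

-- ===== PRECONDITION & SPEC =====
-- Pre_ excludes exactly the inputs where Python A raises: the empty matrix
-- (IndexError on matrix[0]), an empty row (ValueError from max), or a row
-- shorter than the first row (IndexError in the column loop).
def Pre_ordering (matrix : List (List Int)) : Prop :=
  matrix ≠ [] ∧ ∀ r ∈ matrix, r ≠ [] ∧ (matrix.headD []).length ≤ r.length
instance (matrix : List (List Int)) : Decidable (Pre_ordering matrix) := by
  unfold Pre_ordering; infer_instance
def pvWitness_ordering : List (List Int) := [[1, 2], [3, 0]]

def Spec_ordering (matrix : List (List Int)) (out : Int) : Prop := out = ordering_alt matrix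
instance (matrix : List (List Int)) (out : Int) : Decidable (Spec_ordering matrix out) := by unfold Spec_ordering; infer_instance

-- ===== CLAIM (what is proved, stated in full; the proofs are below) =====
def Claim_equal_ordering : Prop := ∀ (matrix : List (List Int)), Dom_ordering matrix → Pre_ordering matrix → Spec_ordering matrix (ordering matrix)

-- ===== LEMMAS AND PROOFS =====

lemma all_congr' {α : Type} (l : List α) (f g : α → Bool)
    (h : ∀ x ∈ l, f x = g x) : l.all f = l.all g := by
  induction l with
  | nil => rfl
  | cons a t ih =>
    simp only [List.all_cons, h a (by simp)]
    rw [ih (fun x hx => h x (by simp [hx]))]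

lemma foldl_congr' {α β : Type} (l : List α) (f g : β → α → β) (s : β)
    (h : ∀ t x, x ∈ l → f t x = g t x) : l.foldl f s = l.foldl g s := by
  induction l generalizing s with
  | nil => rfl
  | cons a t ih =>
    simp only [List.foldl_cons, h s a (by simp)]
    exact ih _ (fun t' x hx => h t' x (by simp [hx]))

-- index-pair `all` over range(len-1) coincides with zip-of-consecutive-pairs `all`
lemma all_range_getD (f : Int → Int → Bool) :
    ∀ l : List Int,
      ((List.range (l.length - 1)).all (fun j => f (l.getD j 0) (l.getD (j + 1) 0))) =
      ((l.zip l.tail).all (fun p => f p.1 p.2)) := by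
  intro l
  induction l with
  | nil => rfl
  | cons a t ih =>
    cases t with
    | nil => rfl
    | cons b t' =>
      have h1 : (a :: b :: t').length - 1 = (b :: t').length - 1 + 1 := by
        simp [List.length]
      rw [h1, List.range_succ_eq_map, List.all_cons, List.all_map]
      have hz : ((a :: b :: t').zip (a :: b :: t').tail).all (fun p => f p.1 p.2) =
          (f a b && ((b :: t').zip (b :: t').tail).all (fun p => f p.1 p.2)) := by
        simp [List.zip]
      rw [hz, ← ih]
      have hrest : (List.range ((b :: t').length - 1)).all
          ((fun j => f ((a :: b :: t').getD j 0) ((a :: b :: t').getD (j + 1) 0)) ∘ Nat.succ) =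
          (List.range ((b :: t').length - 1)).all
          (fun j => f ((b :: t').getD j 0) ((b :: t').getD (j + 1) 0)) := by
        apply all_congr'
        intro j _
        simp [Function.comp]
      rw [hrest]
      rfl

-- zip-of-consecutive-pairs `all` decides the Pairwise property (transitive relations)
lemma zip_all_le_iff_pairwise (l : List Int) :
    ((l.zip l.tail).all (fun p => decide (p.1 ≤ p.2))) = true ↔ l.Pairwise (· ≤ ·) := by
  induction l with
  | nil => simp
  | cons a t ih =>
    cases t with
    | nil => simp
    | cons b t' =>
      rw [List.pairwise_cons]
      constructor
      · intro h
        simp only [List.zip, List.tail_cons, List.zipWith_cons_cons, List.all_cons,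
          Bool.and_eq_true, decide_eq_true_eq] at h
        have hp := ih.mp (by simpa [List.zip] using h.2)
        refine ⟨?_, hp⟩
        intro x hx
        rcases List.mem_cons.mp hx with rfl | hx
        · exact h.1
        · exact le_trans h.1 (List.rel_of_pairwise_cons hp hx)
      · intro ⟨hall, hp⟩
        simp only [List.zip, List.tail_cons, List.zipWith_cons_cons, List.all_cons,
          Bool.and_eq_true, decide_eq_true_eq]
        exact ⟨hall b (by simp), by simpa [List.zip] using ih.mpr hp⟩

lemma zip_all_ge_iff_pairwise (l : List Int) :
    ((l.zip l.tail).all (fun p => decide (p.1 ≥ p.2))) = true ↔ l.Pairwise (fun a b => b ≤ a) := by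
  induction l with
  | nil => simp
  | cons a t ih =>
    cases t with
    | nil => simp
    | cons b t' =>
      rw [List.pairwise_cons]
      constructor
      · intro h
        simp only [List.zip, List.tail_cons, List.zipWith_cons_cons, List.all_cons,
          Bool.and_eq_true, decide_eq_true_eq, ge_iff_le] at h
        have hp := ih.mp (by simpa [List.zip] using h.2)
        refine ⟨?_, hp⟩
        intro x hx
        rcases List.mem_cons.mp hx with rfl | hx
        · exact h.1
        · exact le_trans (List.rel_of_pairwise_cons hp hx) h.1
      · intro ⟨hall, hp⟩
        simp only [List.zip, List.tail_cons, List.zipWith_cons_cons, List.all_cons,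
          Bool.and_eq_true, decide_eq_true_eq, ge_iff_le]
        exact ⟨hall b (by simp), by simpa [List.zip] using ih.mpr hp⟩

-- row == sorted(row) decides nondecreasing
lemma eq_sorted_iff_pairwise (r : List Int) :
    r = PySem.List.sorted r (fun x => x) false ↔ r.Pairwise (· ≤ ·) := by
  constructor
  · intro h
    have := PySem.List.sorted_pairwise r (fun x => x)
    rw [← h] at this
    simpa using this
  · intro h
    exact (PySem.List.sorted_eq_self_of_pairwise r (fun x => x) (by simpa using h)).symm

-- row == sorted(row)[::-1] decides nonincreasing
lemma eq_sorted_rev_iff_pairwise (r : List Int) :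
    r = (PySem.List.sorted r (fun x => x) false).reverse ↔ r.Pairwise (fun a b => b ≤ a) := by
  constructor
  · intro h
    have hs := PySem.List.sorted_pairwise r (fun x => x)
    have : (PySem.List.sorted r (fun x => x) false).reverse.Pairwise (fun a b => b ≤ a) := by
      rw [List.pairwise_reverse]; simpa using hs
    rw [← h] at this
    exact this
  · intro h
    have hrev : r.reverse.Pairwise (· ≤ ·) := by
      rw [List.pairwise_reverse]; exact h
    have := PySem.List.sorted_id_eq_of_perm_of_pairwise (xs := r) (ys := r.reverse)
      (List.reverse_perm r) hrev
    rw [this, List.reverse_reverse]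

lemma rowMonoB_eq_rowMonoA (r : List Int) : rowMonoB r = rowMonoA r := by
  unfold rowMonoB rowMonoA
  rw [all_range_getD (fun x y => decide (x ≥ y)) r,
      all_range_getD (fun x y => decide (x ≤ y)) r]
  have h1 : decide (r = PySem.List.sorted r (fun x => x) false) =
      ((r.zip r.tail).all (fun p => decide (p.1 ≤ p.2))) := by
    by_cases hp : r.Pairwise (· ≤ ·)
    · rw [decide_eq_true ((eq_sorted_iff_pairwise r).mpr hp),
          (zip_all_le_iff_pairwise r).mpr hp]
    · rw [decide_eq_false (fun h => hp ((eq_sorted_iff_pairwise r).mp h)),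
          show ((r.zip r.tail).all (fun p => decide (p.1 ≤ p.2))) = false from
            Bool.eq_false_iff.mpr (fun h => hp ((zip_all_le_iff_pairwise r).mp h))]
  have h2 : decide (r = (PySem.List.sorted r (fun x => x) false).reverse) =
      ((r.zip r.tail).all (fun p => decide (p.1 ≥ p.2))) := by
    by_cases hp : r.Pairwise (fun a b => b ≤ a)
    · rw [decide_eq_true ((eq_sorted_rev_iff_pairwise r).mpr hp),
          (zip_all_ge_iff_pairwise r).mpr hp]
    · rw [decide_eq_false (fun h => hp ((eq_sorted_rev_iff_pairwise r).mp h)),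
          show ((r.zip r.tail).all (fun p => decide (p.1 ≥ p.2))) = false from
            Bool.eq_false_iff.mpr (fun h => hp ((zip_all_ge_iff_pairwise r).mp h))]
  rw [h1, h2, Bool.or_comm]

-- folding over row indices equals folding over the rows themselves
lemma foldl_range_getD (g : Int → List Int → Int) :
    ∀ (l : List (List Int)) (s : Int),
      (List.range l.length).foldl (fun s i => g s (l.getD i [])) s = l.foldl g s := by
  intro l
  induction l with
  | nil => intro s; rfl
  | cons a t ih =>
    intro s
    rw [show (a :: t).length = t.length + 1 from rfl, List.range_succ_eq_map,
        List.foldl_cons, List.foldl_map]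
    simp only [List.getD_cons_zero, List.getD_cons_succ]
    exact ih (g s a)

-- mapping over row indices equals mapping over the rows themselves
lemma map_range_getD (g : List Int → Int) :
    ∀ (l : List (List Int)), (List.range l.length).map (fun i => g (l.getD i [])) = l.map g := by
  intro l
  induction l with
  | nil => rfl
  | cons a t ih =>
    rw [show (a :: t).length = t.length + 1 from rfl, List.range_succ_eq_map,
        List.map_cons, List.map_map]
    simp only [List.getD_cons_zero, List.map_cons]
    rw [show ((fun i => g ((a :: t).getD i [])) ∘ Nat.succ) = (fun i => g (t.getD i [])) from rfl, ih]

-- shifting the accumulator out of an additive fold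
lemma foldl_add_shift {α : Type} (c : α → Int) :
    ∀ (l : List α) (s : Int), l.foldl (fun s x => s + c x) s = s + l.foldl (fun s x => s + c x) 0 := by
  intro l
  induction l with
  | nil => intro s; simp
  | cons a t ih => intro s; simp only [List.foldl_cons]; rw [ih (s + c a), ih (0 + c a)]; ring

-- the index loop 'for j in range(n): l[j] = g(l[j], j)' as a whole
def updFold {α : Type} (g : α → Nat → α) (d : α) (l : List α) (n : Nat) : List α :=
  (List.range n).foldl (fun l j => l.set j (g (l.getD j d) j)) l

lemma length_updFold {α : Type} (g : α → Nat → α) (d : α) (l : List α) (n : Nat) :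
    (updFold g d l n).length = l.length := by
  induction n with
  | zero => rfl
  | succ m ih =>
    unfold updFold
    rw [List.range_succ, List.foldl_append]
    simpa [updFold] using ih

lemma getD_updFold {α : Type} (g : α → Nat → α) (d : α) (l : List α) :
    ∀ (n : Nat), n ≤ l.length → ∀ (j : Nat),
      (updFold g d l n).getD j d = if j < n then g (l.getD j d) j else l.getD j d := by
  intro n
  induction n with
  | zero => intro _ j; simp [updFold]
  | succ m ih =>
    intro hn j
    have hm : m ≤ l.length := by omega
    have hstep : updFold g d l (m + 1) =
        (updFold g d l m).set m (g ((updFold g d l m).getD m d) m) := by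
      unfold updFold
      rw [List.range_succ, List.foldl_append]
      rfl
    have hbody : (updFold g d l m).getD m d = l.getD m d := by
      rw [ih hm m]; simp
    have hlen := length_updFold g d l m
    rw [hstep, hbody]
    by_cases hj : j = m
    · subst hj
      rw [List.getD_eq_getElem?_getD, List.getElem?_set_self (by omega)]
      simp
    · rw [List.getD_eq_getElem?_getD, List.getElem?_set_ne (fun h => hj h.symm),
          ← List.getD_eq_getElem?_getD, ih hm j]
      by_cases hjm : j < m
      · rw [if_pos hjm, if_pos (by omega)]
      · rw [if_neg hjm, if_neg (by omega)]

-- the conditional in-place writes of colStep are three independent updFolds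
lemma colStep_eq (ncols : Nat) (prev row : List Int) (a b : List Bool) (c : List Int) :
    colStep ncols prev row (a, b, c) =
      (updFold (fun old j => if prev.getD j 0 > row.getD j 0 then false else old) false a ncols,
       updFold (fun old j => if prev.getD j 0 < row.getD j 0 then false else old) false b ncols,
       updFold (fun old j => if row.getD j 0 > old then row.getD j 0 else old) 0 c ncols) := by
  unfold colStep updFold
  rw [PySem.List.foldl_prod_mk
        (f := fun (s : List Bool) j => if prev.getD j 0 > row.getD j 0 then s.set j false else s)
        (g := fun (s : List Bool × List Int) j =>
          ((if prev.getD j 0 < row.getD j 0 then s.1.set j false else s.1),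
           (if row.getD j 0 > s.2.getD j 0 then s.2.set j (row.getD j 0) else s.2)))]
  rw [PySem.List.foldl_prod_mk
        (f := fun (s : List Bool) j => if prev.getD j 0 < row.getD j 0 then s.set j false else s)
        (g := fun (s : List Int) j => if row.getD j 0 > s.getD j 0 then s.set j (row.getD j 0) else s)]
  refine congrArg₂ _ ?_ (congrArg₂ _ ?_ ?_) <;>
  · apply foldl_congr'
    intro l j _
    split
    · next hcnd => simp only [if_pos hcnd]
    · next hcnd =>
      simp only [if_neg hcnd]
      by_cases hj : j < l.length
      · rw [List.getD_eq_getElem l _ hj, List.set_getElem_self]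
      · rw [List.set_eq_of_length_le (by omega)]

-- the column seen as a list
def colOf (m : List (List Int)) (j : Nat) : List Int := m.map (fun r => r.getD j 0)

def incSpec (m : List (List Int)) (j : Nat) : Bool :=
  ((m.zip m.tail).all (fun p => decide (p.1.getD j 0 ≤ p.2.getD j 0)))
def decSpec (m : List (List Int)) (j : Nat) : Bool :=
  ((m.zip m.tail).all (fun p => decide (p.1.getD j 0 ≥ p.2.getD j 0)))

-- the prev/column-state part of B's main fold
def colFold (ncols : Nat) (c0 : List Int) (m : List (List Int)) :
    Option (List Int) × List Bool × List Bool × List Int :=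
  m.foldl
    (fun st row =>
      match st.1 with
      | none => (some row, st.2)
      | some prev => (some row, colStep ncols prev row st.2))
    (none, (List.replicate ncols true, List.replicate ncols true, c0))

lemma zip_tail_append (p : List Int × List Int → Bool) :
    ∀ (l : List (List Int)) (r : List Int),
      (((l ++ [r]).zip (l ++ [r]).tail).all p) =
      ((l.zip l.tail).all p && ((l.getLast?).map (fun a => p (a, r))).getD true) := by
  intro l
  induction l with
  | nil => intro r; simp
  | cons a t ih =>
    intro r
    cases t with
    | nil => simp [List.zip]
    | cons b t' =>
      have hih := ih r
      simp only [List.zip, List.tail_cons, List.cons_append, List.zipWith_cons_cons,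
        List.all_cons] at hih ⊢
      rw [hih, List.getLast?_cons_cons, Bool.and_assoc]

-- main invariant of B's streaming pass over the rows
lemma colFold_inv (ncols : Nat) (c0 : List Int) (hc0 : c0.length = ncols) :
    ∀ (m : List (List Int)),
      (∀ j < ncols, c0.getD j 0 = (m.getD 0 []).getD j 0) →
      (colFold ncols c0 m).1 = m.getLast? ∧
      (colFold ncols c0 m).2.1.length = ncols ∧
      (colFold ncols c0 m).2.2.1.length = ncols ∧
      (colFold ncols c0 m).2.2.2.length = ncols ∧
      ∀ j < ncols,
        (colFold ncols c0 m).2.1.getD j false = incSpec m j ∧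
        (colFold ncols c0 m).2.2.1.getD j false = decSpec m j ∧
        (m ≠ [] → (colFold ncols c0 m).2.2.2.getD j 0 ∈ colOf m j ∧
          ∀ x ∈ colOf m j, x ≤ (colFold ncols c0 m).2.2.2.getD j 0) := by
  intro m
  induction m using List.reverseRecOn with
  | nil =>
    intro _
    refine ⟨rfl, by simp [colFold], by simp [colFold], by simpa [colFold] using hc0, ?_⟩
    intro j hj
    refine ⟨?_, ?_, by simp⟩
    · simp [colFold, incSpec, hj]
    · simp [colFold, decSpec, hj]
  | append_singleton m r ih =>
    intro hc
    have hfold : colFold ncols c0 (m ++ [r]) =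
        (match (colFold ncols c0 m).1 with
         | none => (some r, (colFold ncols c0 m).2)
         | some prev => (some r, colStep ncols prev r (colFold ncols c0 m).2)) := by
      unfold colFold
      rw [List.foldl_append]
      rfl
    cases hm : m with
    | nil =>
      subst hm
      have hprev : (colFold ncols c0 []).1 = none := rfl
      rw [hfold, hprev]
      refine ⟨by simp, by simp [colFold], by simp [colFold], by simpa [colFold] using hc0, ?_⟩
      intro j hj
      refine ⟨?_, ?_, ?_⟩
      · simp [colFold, incSpec, hj]
      · simp [colFold, decSpec, hj]
      · intro _
        have hcj : c0.getD j 0 = r.getD j 0 := by simpa using hc j hj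
        have hcj' : c0[j]?.getD 0 = r[j]?.getD 0 := by
          simpa [List.getD_eq_getElem?_getD] using hcj
        constructor
        · simp [colFold, colOf, List.getD_eq_getElem?_getD, hcj']
        · intro x hx
          simp only [colOf, List.nil_append, List.map_cons, List.map_nil, List.mem_cons,
            List.not_mem_nil, or_false] at hx
          simp [colFold, List.getD_eq_getElem?_getD, hcj', hx]
    | cons m0 mt =>
      rw [← hm]
      have hmne : m ≠ [] := by rw [hm]; exact List.cons_ne_nil _ _
      have hc' : ∀ j < ncols, c0.getD j 0 = (m.getD 0 []).getD j 0 := by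
        intro j hj
        have := hc j hj
        rwa [hm] at this ⊢
      obtain ⟨hprev, hlen1, hlen2, hlen3, hjs⟩ := ih hc'
      obtain ⟨last, hlast⟩ : ∃ a, m.getLast? = some a :=
        Option.isSome_iff_exists.mp (by simp [List.getLast?_isSome, hmne])
      rw [hfold, hprev, hlast]
      simp only
      obtain ⟨a, b, c, hst⟩ : ∃ a b c, (colFold ncols c0 m).2 = (a, b, c) :=
        ⟨_, _, _, rfl⟩
      rw [hst, colStep_eq]
      have ha : a.length = ncols := by rw [hst] at hlen1; exact hlen1
      have hb : b.length = ncols := by rw [hst] at hlen2; exact hlen2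
      have hcc : c.length = ncols := by rw [hst] at hlen3; exact hlen3
      refine ⟨by simp, by simpa using (length_updFold _ false a ncols).trans ha,
              by simpa using (length_updFold _ false b ncols).trans hb,
              by simpa using (length_updFold _ 0 c ncols).trans hcc, ?_⟩
      intro j hj
      obtain ⟨hinc, hdec, hmax⟩ := hjs j hj
      rw [hst] at hinc hdec hmax
      simp only at hinc hdec hmax ⊢
      have hja : j < ncols := hj
      refine ⟨?_, ?_, ?_⟩
      · rw [getD_updFold _ _ _ _ (by omega) j, if_pos hja, hinc]
        unfold incSpec
        rw [zip_tail_append, hlast]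
        simp only [Option.map_some, Option.getD_some]
        by_cases hcmp : last.getD j 0 > r.getD j 0
        · rw [if_pos hcmp, decide_eq_false (show ¬ (last.getD j 0 ≤ r.getD j 0) by omega),
              Bool.and_false]
        · rw [if_neg hcmp, decide_eq_true (show last.getD j 0 ≤ r.getD j 0 by omega),
              Bool.and_true]
      · rw [getD_updFold _ _ _ _ (by omega) j, if_pos hja, hdec]
        unfold decSpec
        rw [zip_tail_append, hlast]
        simp only [Option.map_some, Option.getD_some]
        by_cases hcmp : last.getD j 0 < r.getD j 0
        · rw [if_pos hcmp, decide_eq_false (show ¬ (last.getD j 0 ≥ r.getD j 0) by omega),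
              Bool.and_false]
        · rw [if_neg hcmp, decide_eq_true (show last.getD j 0 ≥ r.getD j 0 by omega),
              Bool.and_true]
      · intro _
        obtain ⟨hmem, hub⟩ := hmax hmne
        have hcol : colOf (m ++ [r]) j = colOf m j ++ [r.getD j 0] := by
          simp [colOf]
        rw [getD_updFold _ _ _ _ (by omega) j, if_pos hja, hcol]
        by_cases hcmp : r.getD j 0 > c.getD j 0
        · rw [if_pos hcmp]
          constructor
          · simp
          · intro x hx
            rcases List.mem_append.mp hx with hx | hx
            · have := hub x hx; omega
            · rw [List.mem_singleton] at hx; omega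
        · rw [if_neg hcmp]
          constructor
          · exact List.mem_append_left _ hmem
          · intro x hx
            rcases List.mem_append.mp hx with hx | hx
            · exact hub x hx
            · rw [List.mem_singleton] at hx; omega

-- pyMaxD of a nonempty list: a member and an upper bound
lemma pyMaxD_spec (l : List Int) (h : l ≠ []) :
    pyMaxD l ∈ l ∧ ∀ x ∈ l, x ≤ pyMaxD l := by
  obtain ⟨a, t, rfl⟩ := List.exists_cons_of_ne_nil h
  unfold pyMaxD
  rw [PySem.List.max?_id_cons]
  simp only [Option.getD_some]
  constructor
  · rcases PySem.List.foldl_max_mem t a with h | h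
    · rw [h]; simp
    · exact List.mem_cons_of_mem a h
  · intro x hx
    rcases List.mem_cons.mp hx with rfl | hx
    · exact (PySem.List.le_foldl_max t x).1
    · exact (PySem.List.le_foldl_max t a).2 x hx

-- getD of the mapped column agrees with A's nested getD at every index
lemma getD_colOf (m : List (List Int)) (j i : Nat) :
    (colOf m j).getD i 0 = (m.getD i []).getD j 0 := by
  unfold colOf
  rw [List.getD_eq_getElem?_getD, List.getD_eq_getElem?_getD, List.getElem?_map]
  cases h : m[i]? with
  | none => simp [h, List.getD_eq_getElem?_getD]
  | some r => simp [h, List.getD_eq_getElem?_getD]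

-- ===== VERDICT (by name: the statement is the Claim_ definition above) =====
theorem ordering_spec : Claim_equal_ordering := by
  intro matrix _ hpre
  obtain ⟨hne, hrows⟩ := hpre
  unfold Spec_ordering ordering ordering_alt
  simp only
  set ncols := (matrix.getD 0 []).length with hncols
  -- split B's combined fold into the score fold and the column-state fold
  rw [PySem.List.foldl_prod_mk
        (f := fun (s : Int) row => s + (if rowMonoB row then pyMaxD row else -pyMaxD row))
        (g := fun (st : Option (List Int) × List Bool × List Bool × List Int) row =>
          match st.1 with
          | none => (some row, st.2)
          | some prev => (some row, colStep ncols prev row st.2))]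
  rw [show matrix.foldl
        (fun st row =>
          match st.1 with
          | none => (some row, st.2)
          | some prev => (some row, colStep ncols prev row st.2))
        (none, (List.replicate ncols true, List.replicate ncols true, (matrix.getD 0 []).take ncols))
      = colFold ncols ((matrix.getD 0 []).take ncols) matrix from rfl]
  -- the row scores agree
  have hrow : (List.range matrix.length).foldl
      (fun score i =>
        if rowMonoA (matrix.getD i [])
        then score + pyMaxD (matrix.getD i [])
        else score - pyMaxD (matrix.getD i [])) 0 =
      matrix.foldl (fun s row => s + (if rowMonoB row then pyMaxD row else -pyMaxD row)) 0 := by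
    rw [foldl_range_getD (fun score r =>
          if rowMonoA r then score + pyMaxD r else score - pyMaxD r) matrix 0]
    apply foldl_congr'
    intro s r _
    rw [rowMonoB_eq_rowMonoA]
    split <;> ring
  rw [hrow]
  -- the column state computed by B matches A's column quantities
  have hc0len : ((matrix.getD 0 []).take ncols).length = ncols := by simp [hncols]
  have hc0 : ∀ j < ncols, ((matrix.getD 0 []).take ncols).getD j 0 = (matrix.getD 0 []).getD j 0 := by
    intro j hj
    rw [List.getD_eq_getElem?_getD, List.getD_eq_getElem?_getD, List.getElem?_take]
    simp [hj]
  obtain ⟨_, _, _, _, hjs⟩ := colFold_inv ncols ((matrix.getD 0 []).take ncols) hc0len matrix hc0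
  set st := colFold ncols ((matrix.getD 0 []).take ncols) matrix with hstdef
  rw [foldl_add_shift (fun j =>
        if st.2.1.getD j false || st.2.2.1.getD j false
        then st.2.2.2.getD j 0 else -st.2.2.2.getD j 0) (List.range ncols)]
  rw [foldl_congr' (List.range ncols) _
    (fun score j => score +
      (if st.2.1.getD j false || st.2.2.1.getD j false
       then st.2.2.2.getD j 0 else -st.2.2.2.getD j 0)) _
    ?_]
  · exact foldl_add_shift _ _ _
  intro t j hjmem
  have hj : j < ncols := List.mem_range.mp hjmem
  obtain ⟨hinc, hdec, hmax⟩ := hjs j hj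
  obtain ⟨hmem, hub⟩ := hmax hne
  -- A's column list is colOf
  have hcolA : (List.range matrix.length).map (fun i => (matrix.getD i []).getD j 0) =
      colOf matrix j := map_range_getD (fun r => r.getD j 0) matrix
  -- A's maximum equals B's running maximum
  have hcne : colOf matrix j ≠ [] := by simp [colOf, hne]
  obtain ⟨hmem', hub'⟩ := pyMaxD_spec (colOf matrix j) hcne
  have hmaxeq : pyMaxD (colOf matrix j) = st.2.2.2.getD j 0 :=
    le_antisymm (hub _ hmem') (hub' _ hmem)
  -- A's column monotonicity tests equal B's flags
  have hzipmap : ∀ (f : Int → Int → Bool),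
      (((colOf matrix j).zip (colOf matrix j).tail).all (fun p => f p.1 p.2)) =
      ((matrix.zip matrix.tail).all (fun p => f (p.1.getD j 0) (p.2.getD j 0))) := by
    intro f
    unfold colOf
    rw [← List.map_tail, List.zip_map, List.all_map]
    rfl
  have hge : ((List.range (matrix.length - 1)).all
      (fun i => decide ((matrix.getD i []).getD j 0 ≥ (matrix.getD (i + 1) []).getD j 0))) =
      decSpec matrix j := by
    have hlen : matrix.length = (colOf matrix j).length := by simp [colOf]
    calc ((List.range (matrix.length - 1)).all
        (fun i => decide ((matrix.getD i []).getD j 0 ≥ (matrix.getD (i + 1) []).getD j 0)))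
        = ((List.range ((colOf matrix j).length - 1)).all
            (fun i => decide ((colOf matrix j).getD i 0 ≥ (colOf matrix j).getD (i + 1) 0))) := by
          rw [← hlen]
          apply all_congr'
          intro i _
          rw [getD_colOf, getD_colOf]
      _ = (((colOf matrix j).zip (colOf matrix j).tail).all (fun p => decide (p.1 ≥ p.2))) :=
          all_range_getD (fun x y => decide (x ≥ y)) (colOf matrix j)
      _ = decSpec matrix j := hzipmap (fun x y => decide (x ≥ y))
  have hle : ((List.range (matrix.length - 1)).all
      (fun i => decide ((matrix.getD i []).getD j 0 ≤ (matrix.getD (i + 1) []).getD j 0))) =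
      incSpec matrix j := by
    have hlen : matrix.length = (colOf matrix j).length := by simp [colOf]
    calc ((List.range (matrix.length - 1)).all
        (fun i => decide ((matrix.getD i []).getD j 0 ≤ (matrix.getD (i + 1) []).getD j 0)))
        = ((List.range ((colOf matrix j).length - 1)).all
            (fun i => decide ((colOf matrix j).getD i 0 ≤ (colOf matrix j).getD (i + 1) 0))) := by
          rw [← hlen]
          apply all_congr'
          intro i _
          rw [getD_colOf, getD_colOf]
      _ = (((colOf matrix j).zip (colOf matrix j).tail).all (fun p => decide (p.1 ≤ p.2))) :=
          all_range_getD (fun x y => decide (x ≤ y)) (colOf matrix j)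
      _ = incSpec matrix j := hzipmap (fun x y => decide (x ≤ y))
  rw [hge, hle, hcolA, hmaxeq, ← hinc, ← hdec, Bool.or_comm]
  split
  · next h => simp only [if_pos h]
  · next h => simp only [if_neg h]; ring
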